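-- pv_equiv track=rewrite | github.com/faizunnur/DevOps-agent-v4 | agents/code_agent.py | _split_job_sections
-- ===== SOURCE A (Python) =====
-- def _split_job_sections(log: str) -> list:
--     """Split combined log into individual job sections."""
--     sections = []
--     current_name = "unknown"
--     current_lines = []
--
--     for line in log.splitlines():
--         if line.startswith("=== JOB:") and "===" in line[8:]:
--             if current_lines:
--                 sections.append({"name": current_name, "log": "\n".join(current_lines)})
--             current_name  = line
--             current_lines = [line]
--         else:
--             current_lines.append(line)
--
--     if current_lines:
--         sections.append({"name": current_name, "log": "\n".join(current_lines)})
--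
--     return sections
-- ===== SOURCE B (Python) =====
-- def _split_job_sections(log: str) -> list:
--     """Split combined log into individual job sections (span/chunk decomposition)."""
--     lines = log.splitlines()
--
--     def is_marker(line):
--         return line.startswith("=== JOB:") and "===" in line[8:]
--
--     def span(ls):
--         # longest marker-free prefix, and the rest
--         for k, l in enumerate(ls):
--             if is_marker(l):
--                 return ls[:k], ls[k:]
--         return ls, []
--
--     pre, rest = span(lines)
--     sections = []
--     if pre:
--         sections.append({"name": "unknown", "log": "\n".join(pre)})
--     while rest:
--         head, tail = rest[0], rest[1:]
--         body, rest = span(tail)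
--         sections.append({"name": head, "log": "\n".join([head] + body)})
--     return sections
-- ===== Notes on version B (the rewrite author's own statement) =====
-- stated objective: alternative
-- what changed: Replaced A's single-pass fold with mutable (sections, current_name, current_lines) state by a span/chunk decomposition: emit the marker-free prefix as a leading section, then repeatedly cut one whole section at the next marker.
import Mathlib
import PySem

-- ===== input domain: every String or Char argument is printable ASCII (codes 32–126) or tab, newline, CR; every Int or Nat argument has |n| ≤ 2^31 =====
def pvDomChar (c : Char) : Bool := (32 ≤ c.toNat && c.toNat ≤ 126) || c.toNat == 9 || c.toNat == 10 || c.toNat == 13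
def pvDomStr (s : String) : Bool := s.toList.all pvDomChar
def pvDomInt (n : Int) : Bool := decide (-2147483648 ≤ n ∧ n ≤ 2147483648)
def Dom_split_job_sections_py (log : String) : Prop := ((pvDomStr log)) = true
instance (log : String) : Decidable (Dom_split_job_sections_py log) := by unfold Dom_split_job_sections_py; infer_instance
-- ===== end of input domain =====

-- B replaces A's one-pass accumulator fold by a span/chunk decomposition; objective: alternative (same cost).

-- line.startswith("=== JOB:") and "===" in line[8:]  (identical test in both Pythons)
def pvIsMarker (line : String) : Bool :=
  PySem.Str.startswith line "=== JOB:" && PySem.Str.isIn "===" (PySem.Str.slice line (some 8) none)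

-- ===== PORT A =====
def split_job_sections_py (log : String) : List (List (String × String)) :=
  let step := fun (st : List (List (String × String)) × String × List String) (line : String) =>
    let (sections, current_name, current_lines) := st
    if pvIsMarker line then
      ((if current_lines ≠ [] then
          sections ++ [[("name", current_name), ("log", PySem.Str.join "\n" current_lines)]]
        else sections), line, [line])
    else
      (sections, current_name, current_lines ++ [line])
  let r := (PySem.Str.splitlines log).foldl step ([], "unknown", [])
  if r.2.2 ≠ [] then
    r.1 ++ [[("name", r.2.1), ("log", PySem.Str.join "\n" r.2.2)]]
  else r.1

-- ===== PORT B =====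
-- span(ls): longest marker-free prefix, and the rest
def pvSpanNon : List String → List String × List String
  | [] => ([], [])
  | l :: ls =>
    if pvIsMarker l then ([], l :: ls)
    else
      let p := pvSpanNon ls
      (l :: p.1, p.2)

theorem pvSpanNon_snd_length_le (ls : List String) : (pvSpanNon ls).2.length ≤ ls.length := by
  induction ls with
  | nil => simp [pvSpanNon]
  | cons l t ih =>
    simp only [pvSpanNon]
    split
    · simp
    · simpa using Nat.le_succ_of_le ih

-- the while-loop of B: cut one whole section per iteration
def pvChunks : List String → List (List (String × String))
  | [] => []
  | h :: t =>
    let p := pvSpanNon t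
    [("name", h), ("log", PySem.Str.join "\n" (h :: p.1))] :: pvChunks p.2
termination_by ls => ls.length
decreasing_by
  exact Nat.lt_succ_of_le (pvSpanNon_snd_length_le t)

def split_job_sections_py_alt (log : String) : List (List (String × String)) :=
  let p := pvSpanNon (PySem.Str.splitlines log)
  (if p.1 ≠ [] then [[("name", "unknown"), ("log", PySem.Str.join "\n" p.1)]] else []) ++
    pvChunks p.2

-- ===== PRECONDITION & SPEC =====
def Spec_split_job_sections_py (log : String) (out : List (List (String × String))) : Prop := out = split_job_sections_py_alt log
instance (log : String) (out : List (List (String × String))) : Decidable (Spec_split_job_sections_py log out) := by unfold Spec_split_job_sections_py; infer_instance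

-- ===== CLAIM (what is proved, stated in full; the proofs are below) =====
def Claim_equal_split_job_sections_py : Prop := ∀ (log : String), Dom_split_job_sections_py log → Spec_split_job_sections_py log (split_job_sections_py log)

-- ===== LEMMAS AND PROOFS =====

-- canonical recursion characterising A's loop state (current_name, current_lines)
def pvGoA : String → List String → List String → List (List (String × String))
  | name, cur, [] =>
    if cur ≠ [] then [[("name", name), ("log", PySem.Str.join "\n" cur)]] else []
  | name, cur, l :: t =>
    if pvIsMarker l then
      (if cur ≠ [] then [[("name", name), ("log", PySem.Str.join "\n" cur)]] else []) ++
        pvGoA l [l] t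
    else
      pvGoA name (cur ++ [l]) t

theorem pvA_fold (rest : List String) : ∀ (s : List (List (String × String))) (name : String)
    (cur : List String),
    (let r := rest.foldl (fun (st : List (List (String × String)) × String × List String) (line : String) =>
        let (sections, current_name, current_lines) := st
        if pvIsMarker line then
          ((if current_lines ≠ [] then
              sections ++ [[("name", current_name), ("log", PySem.Str.join "\n" current_lines)]]
            else sections), line, [line])
        else
          (sections, current_name, current_lines ++ [line])) (s, name, cur)
     if r.2.2 ≠ [] then r.1 ++ [[("name", r.2.1), ("log", PySem.Str.join "\n" r.2.2)]] else r.1)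
    = s ++ pvGoA name cur rest := by
  induction rest with
  | nil =>
    intro s name cur
    simp only [List.foldl, pvGoA]
    split_ifs <;> simp
  | cons l t ih =>
    intro s name cur
    simp only [List.foldl, pvGoA]
    by_cases h : pvIsMarker l = true
    · simp only [h, if_true, ih]
      split_ifs <;> simp
    · simp only [h, if_false, Bool.false_eq_true, ih]

theorem pvGoA_ne (rest : List String) : ∀ (name : String) (cur : List String), cur ≠ [] →
    pvGoA name cur rest =
      [[("name", name), ("log", PySem.Str.join "\n" (cur ++ (pvSpanNon rest).1))]] ++
        pvChunks (pvSpanNon rest).2 := by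
  induction rest with
  | nil =>
    intro name cur hc
    simp [pvGoA, pvSpanNon, pvChunks, hc]
  | cons l t ih =>
    intro name cur hc
    by_cases h : pvIsMarker l = true
    · simp only [pvGoA, pvSpanNon, h, if_true, hc, ne_eq, not_false_iff]
      rw [ih l [l] (by simp)]
      simp [pvChunks]
    · simp only [pvGoA, pvSpanNon, h, if_false, Bool.false_eq_true]
      rw [ih name (cur ++ [l]) (by simp)]
      simp

theorem pvGoA_nil (rest : List String) (name : String) :
    pvGoA name [] rest =
      (if (pvSpanNon rest).1 ≠ [] then
        [[("name", name), ("log", PySem.Str.join "\n" (pvSpanNon rest).1)]] else []) ++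
        pvChunks (pvSpanNon rest).2 := by
  cases rest with
  | nil => simp [pvGoA, pvSpanNon, pvChunks]
  | cons l t =>
    by_cases h : pvIsMarker l = true
    · simp only [pvGoA, pvSpanNon, h, if_true]
      rw [pvGoA_ne t l [l] (by simp)]
      simp [pvChunks]
    · simp only [pvGoA, pvSpanNon, h, if_false, Bool.false_eq_true, List.nil_append]
      rw [pvGoA_ne t name [l] (by simp)]
      simp

-- ===== VERDICT (by name: the statement is the Claim_ definition above) =====
theorem split_job_sections_py_spec : Claim_equal_split_job_sections_py := by
  intro log _
  unfold Spec_split_job_sections_py split_job_sections_py split_job_sections_py_alt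
  have h := pvA_fold (PySem.Str.splitlines log) [] "unknown" []
  simp only [List.nil_append] at h
  exact h.trans (pvGoA_nil _ "unknown")
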